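-- pv_equiv track=rewrite | github.com/mwill20/SageVault | app/security_utils.py | diversity_guard
-- ===== SOURCE A (Python) =====
-- from typing import Any, Dict, List
--
-- def diversity_guard(items: List[dict], key: str = "path", max_per_key: int = 2) -> List[dict]:
--     """Limit how many items share the same `key` value; preserve order."""
--     if not items:
--         return []
--     seen: Dict[Any, int] = {}
--     out: List[dict] = []
--     for it in items:
--         v = it.get(key)
--         cnt = seen.get(v, 0)
--         if cnt < max_per_key:
--             out.append(it)
--             seen[v] = cnt + 1
--     return out
-- ===== SOURCE B (Python) =====
-- from typing import Any, Dict, List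
--
-- def diversity_guard(items: List[dict], key: str = "path", max_per_key: int = 2) -> List[dict]:
--     """Limit how many items share the same `key` value; preserve order."""
--     if max_per_key <= 0:
--         return []
--     positions: Dict[Any, List[int]] = {}
--     for i, it in enumerate(items):
--         positions.setdefault(it.get(key), []).append(i)
--     allowed = set()
--     for idxs in positions.values():
--         allowed.update(idxs[:max_per_key])
--     return [it for i, it in enumerate(items) if i in allowed]
-- ===== Notes on version B (the rewrite author's own statement) =====
-- stated objective: alternative
-- what changed: Replaces A's single pass with an incremental per-key counter dict by an index-table decomposition: one pass groups the indices of each key value, the first max_per_key indices of every group form an allowed set, and a final pass keeps exactly the items at allowed indices.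
import Mathlib
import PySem

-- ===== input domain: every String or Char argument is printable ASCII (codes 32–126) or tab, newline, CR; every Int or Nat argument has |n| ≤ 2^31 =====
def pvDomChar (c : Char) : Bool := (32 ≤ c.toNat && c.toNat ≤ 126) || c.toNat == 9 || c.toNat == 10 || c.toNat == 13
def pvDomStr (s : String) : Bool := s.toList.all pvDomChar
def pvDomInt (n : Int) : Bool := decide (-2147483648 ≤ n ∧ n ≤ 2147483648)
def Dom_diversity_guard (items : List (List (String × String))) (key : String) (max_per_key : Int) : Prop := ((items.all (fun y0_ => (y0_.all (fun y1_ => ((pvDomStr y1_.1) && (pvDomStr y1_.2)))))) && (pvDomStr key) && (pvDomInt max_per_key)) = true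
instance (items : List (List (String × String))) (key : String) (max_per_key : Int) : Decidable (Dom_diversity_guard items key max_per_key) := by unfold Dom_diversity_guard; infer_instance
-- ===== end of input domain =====

-- B replaces A's incremental per-key counter dict by an index-table decomposition
-- (group the indices of each key value, allow the first max_per_key of every group,
-- then keep the items at allowed indices); objective: alternative, same O(n) cost.

-- it.get(key): first-match lookup in the association list modelling the dict `it` (shared by both ports)
def pvKey (key : String) (it : List (String × String)) : Option String :=
  (PySem.Dict.mk it).get? key

-- ===== PORT A =====
def diversity_guard (items : List (List (String × String))) (key : String) (max_per_key : Int) : List (List (String × String)) :=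
  if items = [] then []
  else
    (List.foldl
      (fun (st : PySem.Dict (Option String) Int × List (List (String × String))) it =>
        let v := pvKey key it
        let cnt := st.1.getD v 0
        if cnt < max_per_key then (st.1.insert v (cnt + 1), st.2 ++ [it]) else st)
      (PySem.Dict.empty, []) items).2

-- ===== PORT B =====
def diversity_guard_alt (items : List (List (String × String))) (key : String) (max_per_key : Int) : List (List (String × String)) :=
  if max_per_key ≤ 0 then []
  else
    -- positions: key value ↦ list of the indices where it occurs, in order
    let positions : PySem.Dict (Option String) (List Int) :=
      (PySem.List.enumerate items).foldl
        (fun d p => d.modify (pvKey key p.2) [] (· ++ [p.1])) PySem.Dict.empty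
    -- idxs[:max_per_key] = List.take max_per_key.toNat idxs, exact here since max_per_key > 0
    let allowed : PySem.Set Int :=
      positions.values.foldl (fun s idxs => PySem.Set.update s (idxs.take max_per_key.toNat)) PySem.Set.empty
    ((PySem.List.enumerate items).filter (fun p => PySem.Set.contains allowed p.1)).map Prod.snd

-- ===== PRECONDITION & SPEC =====
def Spec_diversity_guard (items : List (List (String × String))) (key : String) (max_per_key : Int) (out : List (List (String × String))) : Prop := out = diversity_guard_alt items key max_per_key
instance (items : List (List (String × String))) (key : String) (max_per_key : Int) (out : List (List (String × String))) : Decidable (Spec_diversity_guard items key max_per_key out) := by unfold Spec_diversity_guard; infer_instance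

-- ===== CLAIM (what is proved, stated in full; the proofs are below) =====
def Claim_equal_diversity_guard : Prop := ∀ (items : List (List (String × String))) (key : String) (max_per_key : Int), Dom_diversity_guard items key max_per_key → Spec_diversity_guard items key max_per_key (diversity_guard items key max_per_key)

-- ===== LEMMAS AND PROOFS =====

-- The common reference: process `rest` knowing the key values `ks` already seen.
def specRel (key : String) (m : Int) : List (Option String) → List (List (String × String)) → List (List (String × String))
  | _, [] => []
  | ks, it :: rs =>
    if ((ks.count (pvKey key it) : Int)) < m then
      it :: specRel key m (ks ++ [pvKey key it]) rs
    else specRel key m (ks ++ [pvKey key it]) rs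

-- ---- A = specRel ----

lemma A_loop (key : String) (m : Int) :
    ∀ (rest : List (List (String × String))) (ks : List (Option String))
      (seen : PySem.Dict (Option String) Int) (out : List (List (String × String))),
      (∀ v, seen.getD v 0 = min ((ks.count v : Int)) (max m 0)) →
      (List.foldl
        (fun (st : PySem.Dict (Option String) Int × List (List (String × String))) it =>
          if st.1.getD (pvKey key it) 0 < m then
            (st.1.insert (pvKey key it) (st.1.getD (pvKey key it) 0 + 1), st.2 ++ [it])
          else st)
        (seen, out) rest).2 = out ++ specRel key m ks rest := by
  intro rest
  induction rest with
  | nil => intro ks seen out _; simp [specRel]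
  | cons it rs ih =>
    intro ks seen out h
    have hv := h (pvKey key it)
    have h0 : (0:Int) ≤ (ks.count (pvKey key it) : Int) := Int.natCast_nonneg _
    simp only [List.foldl_cons]
    by_cases hlt : seen.getD (pvKey key it) 0 < m
    · have hcond : ((ks.count (pvKey key it) : Int)) < m := by omega
      rw [if_pos hlt]
      have hinv : ∀ v, (seen.insert (pvKey key it) (seen.getD (pvKey key it) 0 + 1)).getD v 0
          = min (((ks ++ [pvKey key it]).count v : Int)) (max m 0) := by
        intro v
        rw [PySem.Dict.getD_insert]
        have hcnt : (ks ++ [pvKey key it]).count v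
            = ks.count v + (if pvKey key it = v then 1 else 0) := by
          simp [List.count_append, List.count_singleton]
        by_cases hvv : v = pvKey key it
        · subst hvv
          rw [if_pos rfl, hcnt, if_pos rfl]
          push_cast
          omega
        · rw [if_neg hvv, h v, hcnt, if_neg (fun hh => hvv hh.symm)]
          simp
      rw [ih (ks ++ [pvKey key it]) _ _ hinv]
      rw [specRel, if_pos hcond]
      simp
    · have hcond : ¬ ((ks.count (pvKey key it) : Int)) < m := by omega
      rw [if_neg hlt]
      have hinv : ∀ v, seen.getD v 0
          = min (((ks ++ [pvKey key it]).count v : Int)) (max m 0) := by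
        intro v
        have hcnt : (ks ++ [pvKey key it]).count v
            = ks.count v + (if pvKey key it = v then 1 else 0) := by
          simp [List.count_append, List.count_singleton]
        by_cases hvv : v = pvKey key it
        · subst hvv
          rw [h _, hcnt, if_pos rfl]
          push_cast
          omega
        · rw [h v, hcnt, if_neg (fun hh => hvv hh.symm)]
          simp
      rw [ih (ks ++ [pvKey key it]) _ _ hinv]
      rw [specRel, if_neg hcond]

lemma A_eq (items : List (List (String × String))) (key : String) (m : Int) :
    diversity_guard items key m = specRel key m [] items := by
  cases items with
  | nil => simp [diversity_guard, specRel]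
  | cons x xs =>
    have hinv0 : ∀ v, (PySem.Dict.empty : PySem.Dict (Option String) Int).getD v 0
        = min ((((([]:List (Option String)).count v : Nat)) : Int)) (max m 0) := by
      intro v
      simp [PySem.Dict.getD_empty]
    show (List.foldl
        (fun (st : PySem.Dict (Option String) Int × List (List (String × String))) it =>
          if st.1.getD (pvKey key it) 0 < m then
            (st.1.insert (pvKey key it) (st.1.getD (pvKey key it) 0 + 1), st.2 ++ [it])
          else st)
        (PySem.Dict.empty, []) (x :: xs)).2 = specRel key m [] (x :: xs)
    rw [A_loop key m (x :: xs) [] PySem.Dict.empty [] hinv0]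
    simp

-- ---- B = specRel ----

lemma specRel_nonpos (key : String) (m : Int) (hm : m ≤ 0) :
    ∀ (l : List (List (String × String))) (ks : List (Option String)), specRel key m ks l = [] := by
  intro l
  induction l with
  | nil => intro ks; simp [specRel]
  | cons x xs ih =>
    intro ks
    rw [specRel, if_neg (by have : (0:Int) ≤ (ks.count (pvKey key x) : Int) := Int.natCast_nonneg _; omega), ih]

-- the index list of the items whose key value is v
def pvOcc (items : List (List (String × String))) (key : String) (v : Option String) : List Int :=
  ((PySem.List.enumerate items).filter (fun p => pvKey key p.2 == v)).map Prod.fst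

def pvPositions (items : List (List (String × String))) (key : String) : PySem.Dict (Option String) (List Int) :=
  (PySem.List.enumerate items).foldl
    (fun d p => d.modify (pvKey key p.2) [] (· ++ [p.1])) PySem.Dict.empty

def pvAllowed (items : List (List (String × String))) (key : String) (m : Int) : PySem.Set Int :=
  (pvPositions items key).values.foldl
    (fun s idxs => PySem.Set.update s (idxs.take m.toNat)) PySem.Set.empty

lemma positions_getD (items : List (List (String × String))) (key : String) (v : Option String) :
    (pvPositions items key).getD v [] = pvOcc items key v := by
  unfold pvPositions pvOcc
  have h2 : ∀ (l : List (Int × List (String × String))) (d : PySem.Dict (Option String) (List Int)),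
      l.foldl (fun d p => d.modify (pvKey key p.2) [] (· ++ [p.1])) d
        = (l.map (fun p => (pvKey key p.2, p.1))).foldl
            (fun d q => d.modify q.1 [] (· ++ [q.2])) d := by
    intro l d
    rw [List.foldl_map]
  rw [h2, PySem.Dict.getD_foldl_modify_append]
  simp [List.filter_map, List.map_map, Function.comp_def]

lemma positions_nodup_keys (items : List (List (String × String))) (key : String) :
    (pvPositions items key).keys.Nodup := by
  exact PySem.Dict.nodup_keys_foldl_modify_key (PySem.List.enumerate items)
    (fun p => pvKey key p.2) [] (fun _ p => (· ++ [p.1])) PySem.Dict.empty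
    (by simp [PySem.Dict.keys_empty])

lemma positions_mem_keys (items : List (List (String × String))) (key : String) (v : Option String) :
    v ∈ (pvPositions items key).keys ↔ ∃ p ∈ PySem.List.enumerate items, pvKey key p.2 = v := by
  have hk : (pvPositions items key).keys
      = PySem.Set.update (PySem.Dict.empty : PySem.Dict (Option String) (List Int)).keys
          ((PySem.List.enumerate items).map (fun p => pvKey key p.2)) :=
    PySem.Dict.keys_foldl_modify_key _ _ _ _ _
  rw [hk, PySem.Set.mem_update]
  simp [PySem.Dict.keys_empty]

lemma mem_foldl_update (vals : List (List Int)) (t : Nat) :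
    ∀ (s0 : PySem.Set Int) (j : Int),
      j ∈ vals.foldl (fun s idxs => PySem.Set.update s (idxs.take t)) s0 ↔
        j ∈ s0 ∨ ∃ idxs ∈ vals, j ∈ idxs.take t := by
  induction vals with
  | nil => intro s0 j; simp
  | cons x xs ih =>
    intro s0 j
    simp only [List.foldl_cons]
    rw [ih, PySem.Set.mem_update]
    constructor
    · rintro ((h | h) | ⟨idxs, hi, hj⟩)
      · exact Or.inl h
      · exact Or.inr ⟨x, by simp, h⟩
      · exact Or.inr ⟨idxs, by simp [hi], hj⟩
    · rintro (h | ⟨idxs, hi, hj⟩)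
      · exact Or.inl (Or.inl h)
      · rcases List.mem_cons.mp hi with h1 | h1
        · exact Or.inl (Or.inr (h1 ▸ hj))
        · exact Or.inr ⟨idxs, h1, hj⟩

lemma mem_allowed (items : List (List (String × String))) (key : String) (m : Int) (j : Int) :
    j ∈ pvAllowed items key m ↔ ∃ v, j ∈ (pvOcc items key v).take m.toNat := by
  unfold pvAllowed
  rw [mem_foldl_update]
  constructor
  · rintro (h | ⟨idxs, hi, hj⟩)
    · simp [PySem.Set.empty] at h
    · rw [PySem.Dict.values_eq_map_keys _ (positions_nodup_keys items key) []] at hi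
      rcases List.mem_map.mp hi with ⟨v, _, rfl⟩
      exact ⟨v, by rwa [positions_getD] at hj⟩
  · rintro ⟨v, hj⟩
    right
    refine ⟨(pvPositions items key).getD v [], ?_, by rwa [positions_getD]⟩
    rw [PySem.Dict.values_eq_map_keys _ (positions_nodup_keys items key) []]
    refine List.mem_map.mpr ⟨v, ?_, rfl⟩
    rw [positions_mem_keys]
    have hocc : j ∈ pvOcc items key v := List.mem_of_mem_take hj
    unfold pvOcc at hocc
    rcases List.mem_map.mp hocc with ⟨p, hp, rfl⟩
    exact ⟨p, List.mem_of_mem_filter hp, by simpa using (List.of_mem_filter hp)⟩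

-- rank characterisation of membership in the truncated occurrence list
lemma mem_take_occAux (key : String) (v : Option String) :
    ∀ (l : List (List (String × String))) (n : Int) (t : Nat) (i : Int),
      i ∈ ((((PySem.List.enumerate l n).filter (fun p => pvKey key p.2 == v)).map Prod.fst).take t) ↔
        ∃ (j : Nat), ∃ (hj : j < l.length), i = n + j ∧ pvKey key l[j] = v ∧
          ((l.map (pvKey key)).take j).count v < t := by
  intro l
  induction l with
  | nil => intro n t i; simp [PySem.List.enumerate_nil]
  | cons x xs ih =>
    intro n t i
    rw [PySem.List.enumerate_cons]
    by_cases hx : pvKey key x = v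
    · rw [List.filter_cons_of_pos (by simpa using hx)]
      cases t with
      | zero => simp
      | succ s =>
        simp only [List.map_cons, List.take_succ_cons, List.mem_cons, ih]
        constructor
        · rintro (rfl | ⟨j, hj, rfl, hk, hc⟩)
          · exact ⟨0, by simp, by simp, by simpa using hx, by simp⟩
          · refine ⟨j + 1, by simpa using hj, by push_cast; ring, by simpa using hk, ?_⟩
            simp only [List.take_succ_cons, List.count_cons]
            simp [hx]
            omega
        · rintro ⟨j, hj, hi, hk, hc⟩
          cases j with
          | zero => left; simpa using hi
          | succ j' =>
            right
            refine ⟨j', by simpa using hj, by push_cast at hi ⊢; omega, by simpa using hk, ?_⟩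
            simp only [List.take_succ_cons, List.count_cons] at hc
            simp [hx] at hc
            omega
    · rw [List.filter_cons_of_neg (by simpa using hx)]
      rw [ih]
      constructor
      · rintro ⟨j, hj, rfl, hk, hc⟩
        refine ⟨j + 1, by simpa using hj, by push_cast; ring, by simpa using hk, ?_⟩
        simp only [List.map_cons, List.take_succ_cons, List.count_cons]
        simp [hx]
        omega
      · rintro ⟨j, hj, hi, hk, hc⟩
        cases j with
        | zero => exact absurd (by simpa using hk) hx
        | succ j' =>
          refine ⟨j', by simpa using hj, by push_cast at hi ⊢; omega, by simpa using hk, ?_⟩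
          simp only [List.map_cons, List.take_succ_cons, List.count_cons] at hc
          simp [hx] at hc
          omega

lemma contains_allowed (items : List (List (String × String))) (key : String) (m : Int)
    (j : Nat) (hj : j < items.length) :
    (PySem.Set.contains (pvAllowed items key m) (j : Int) = true) ↔
      ((items.map (pvKey key)).take j).count (pvKey key items[j]) < m.toNat := by
  rw [show (PySem.Set.contains (pvAllowed items key m) (j : Int) = true) ↔
      ((j : Int) ∈ pvAllowed items key m) from by
    simp [PySem.Set.contains, List.contains_eq_mem]]
  rw [mem_allowed]
  constructor
  · rintro ⟨v, hv⟩
    have h1 := (mem_take_occAux key v items 0 m.toNat (j : Int)).mp (by simpa [pvOcc] using hv)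
    rcases h1 with ⟨j', hj', hij, hk, hc⟩
    have : j' = j := by omega
    subst this
    rwa [hk]
  · intro hc
    refine ⟨pvKey key items[j], ?_⟩
    show ((j:Int)) ∈ (pvOcc items key _).take m.toNat
    unfold pvOcc
    exact (mem_take_occAux key _ items 0 m.toNat (j : Int)).mpr ⟨j, hj, by simp, rfl, hc⟩

lemma B_loop (items : List (List (String × String))) (key : String) (m : Int) (hm : 0 < m) :
    ∀ (l pref : List (List (String × String))), pref ++ l = items →
      (((PySem.List.enumerate l (pref.length : Int)).filter
          (fun p => PySem.Set.contains (pvAllowed items key m) p.1)).map Prod.snd)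
        = specRel key m (pref.map (pvKey key)) l := by
  intro l
  induction l with
  | nil => intro pref _; simp [PySem.List.enumerate_nil, specRel]
  | cons x rs ih =>
    intro pref heq
    rw [PySem.List.enumerate_cons]
    have hlen : pref.length < items.length := by rw [← heq]; simp
    have hx : items[pref.length]'hlen = x := by
      subst heq
      rw [List.getElem_append_right (le_refl _)]
      simp
    have htake : (items.map (pvKey key)).take pref.length = pref.map (pvKey key) := by
      subst heq
      rw [List.map_append]
      exact List.take_left' (by simp)
    have hcontains := contains_allowed items key m pref.length hlen
    rw [hx, htake] at hcontains
    have hcnt : ((((pref.map (pvKey key)).count (pvKey key x) : Nat) : Int)) < m ↔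
        (pref.map (pvKey key)).count (pvKey key x) < m.toNat := by omega
    rw [specRel]
    by_cases hc : (((pref.map (pvKey key)).count (pvKey key x) : Nat) : Int) < m
    · rw [if_pos hc]
      rw [List.filter_cons_of_pos (by simp only; exact hcontains.mpr (hcnt.mp hc))]
      simp only [List.map_cons]
      congr 1
      have h3 := ih (pref ++ [x]) (by simpa using heq)
      simpa using h3
    · rw [if_neg hc]
      rw [List.filter_cons_of_neg (by
        simp only
        intro hcon
        exact hc (hcnt.mpr (hcontains.mp hcon)))]
      have h3 := ih (pref ++ [x]) (by simpa using heq)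
      simpa using h3

lemma B_eq (items : List (List (String × String))) (key : String) (m : Int) :
    diversity_guard_alt items key m = specRel key m [] items := by
  by_cases hm : m ≤ 0
  · rw [specRel_nonpos key m hm]
    simp [diversity_guard_alt, hm]
  · have h1 : diversity_guard_alt items key m =
        ((PySem.List.enumerate items).filter
          (fun p => PySem.Set.contains (pvAllowed items key m) p.1)).map Prod.snd := by
      simp only [diversity_guard_alt, if_neg hm]
      rfl
    rw [h1]
    have h2 := B_loop items key m (by omega) items [] (by simp)
    simpa using h2

-- ===== VERDICT (by name: the statement is the Claim_ definition above) =====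
theorem diversity_guard_spec : Claim_equal_diversity_guard := by
  intro items key m _
  unfold Spec_diversity_guard
  rw [A_eq, B_eq]
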